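-- pv_equiv track=rewrite | github.com/adam-weinberger/enterprise-code-generation | evaluation_framework/prompt_maker.py | get_relevant_line_indices
-- ===== SOURCE A (Python) =====
-- def get_relevant_line_indices(lines,num_label_lines=1,min_lines_above=1,min_lines_below=1):
--     """
--     Takes lines of code and creates a list of line indices for lines that are not used for whitespace, comments, imports, or packages.
--     """
--
--     # remove empty lines, single line comments, import statements, packages
--     relevant_lines_indices_with_mlcomments = [index for index, line in enumerate(lines) if line.strip() != '']
--     relevant_lines_indices_with_mlcomments = [index for index in relevant_lines_indices_with_mlcomments if not lines[index].strip().startswith('//')]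
--     relevant_lines_indices_with_mlcomments = [index for index in relevant_lines_indices_with_mlcomments if not lines[index].strip().startswith('#')]
--     relevant_lines_indices_with_mlcomments = [index for index in relevant_lines_indices_with_mlcomments if not (lines[index].strip().startswith('import') or lines[index].strip().startswith('package'))]
--
--     # To handle multiline comments, we can use a flag
--     in_multiline_comment = False
--     relevant_line_indices = []
--
--     for index in relevant_lines_indices_with_mlcomments:
--         line = lines[index]
--
--         if line.strip().startswith('/*'):
--             in_multiline_comment = True
--
--         if not in_multiline_comment:
--             relevant_line_indices.append(index)
--
--         if line.strip().endswith('*/'):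
--             in_multiline_comment = False
--
--     # can only choose a line for a prompt if there are enough lines of context above and below
--     # Adam: Why? any line should be possible to be chosen for prompt.
--     trimmed_relevant_line_indices = relevant_line_indices[min_lines_above+1:- (num_label_lines + min_lines_below)]
--
--     return trimmed_relevant_line_indices
-- ===== SOURCE B (Python) =====
-- def get_relevant_line_indices(lines, num_label_lines=1, min_lines_above=1, min_lines_below=1):
--     """
--     Delimiter-search algorithm: strip every line once, filter out the
--     irrelevant indices, then instead of a per-line comment flag repeatedly
--     locate the next '/*' opener, keep the span before it, and jump past the
--     first '*/' closer at or after it; finally trim with the same slice.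
--     """
--     stripped = [line.strip() for line in lines]
--     candidates = [i for i, s in enumerate(stripped)
--                   if s and not s.startswith(('//', '#', 'import', 'package'))]
--     kept = []
--     rest = candidates
--     while rest:
--         j = next((k for k, i in enumerate(rest) if stripped[i].startswith('/*')), None)
--         if j is None:
--             kept.extend(rest)
--             break
--         kept.extend(rest[:j])
--         e = next((k for k in range(j, len(rest)) if stripped[rest[k]].endswith('*/')), None)
--         if e is None:
--             break
--         rest = rest[e + 1:]
--     return kept[min_lines_above + 1:-(num_label_lines + min_lines_below)]
-- ===== Notes on version B (the rewrite author's own statement) =====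
-- stated objective: alternative
-- what changed: Replaces A's four index comprehensions plus a per-line boolean comment-flag loop by a precomputed stripped table, one combined filter, and a delimiter-search loop that repeatedly finds the next '/*' opener, keeps the span before it and jumps past the first '*/' closer at or after it, then applies the same final slice.
import Mathlib
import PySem

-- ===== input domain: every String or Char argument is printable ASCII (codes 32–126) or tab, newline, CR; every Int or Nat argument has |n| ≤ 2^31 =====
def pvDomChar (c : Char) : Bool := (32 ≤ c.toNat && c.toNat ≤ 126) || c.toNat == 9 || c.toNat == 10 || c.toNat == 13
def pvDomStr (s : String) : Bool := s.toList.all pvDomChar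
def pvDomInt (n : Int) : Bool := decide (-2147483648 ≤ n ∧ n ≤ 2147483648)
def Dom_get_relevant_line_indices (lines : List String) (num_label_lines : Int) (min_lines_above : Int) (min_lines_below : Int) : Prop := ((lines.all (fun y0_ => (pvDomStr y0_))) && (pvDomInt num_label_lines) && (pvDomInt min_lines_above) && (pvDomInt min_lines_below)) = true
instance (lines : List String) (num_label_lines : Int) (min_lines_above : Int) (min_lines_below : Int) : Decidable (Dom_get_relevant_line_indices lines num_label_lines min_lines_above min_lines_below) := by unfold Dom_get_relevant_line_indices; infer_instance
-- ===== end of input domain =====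

-- B replaces A's four index comprehensions plus a per-line comment-flag loop by a stripped table,
-- one combined filter, and a delimiter-search loop jumping from '/*' opener to '*/' closer (objective: alternative).

-- ===== PORT A =====
-- Indices produced by enumerate are always in range, so lines[index] is ported exactly by pyGetD with an unused default.
def get_relevant_line_indices (lines : List String) (num_label_lines : Int) (min_lines_above : Int) (min_lines_below : Int) : List Int :=
  let r0 := ((PySem.List.enumerate lines 0).filter
      (fun p => !(PySem.Str.strip p.2 == ""))).map (fun p => p.1)
  let r1 := r0.filter (fun index =>
      !(PySem.Str.startswith (PySem.Str.strip (PySem.List.pyGetD lines index "")) "//"))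
  let r2 := r1.filter (fun index =>
      !(PySem.Str.startswith (PySem.Str.strip (PySem.List.pyGetD lines index "")) "#"))
  let r3 := r2.filter (fun index =>
      !(PySem.Str.startswith (PySem.Str.strip (PySem.List.pyGetD lines index "")) "import" ||
        PySem.Str.startswith (PySem.Str.strip (PySem.List.pyGetD lines index "")) "package"))
  let fin := r3.foldl (fun (st : Bool × List Int) index =>
      let line := PySem.List.pyGetD lines index ""
      let f1 := if PySem.Str.startswith (PySem.Str.strip line) "/*" then true else st.1
      let acc := if !f1 then st.2 ++ [index] else st.2
      let f2 := if PySem.Str.endswith (PySem.Str.strip line) "*/" then false else f1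
      (f2, acc)) (false, ([] : List Int))
  PySem.List.slice fin.2 (some (min_lines_above + 1)) (some (-(num_label_lines + min_lines_below)))

-- ===== PORT B =====
-- The while loop of Source B: next((k for k,i in enumerate(rest) …), None) is findIdx?, and
-- next((k for k in range(j, len(rest)) …), None) is j + offset with offset = findIdx? on rest[j:]
-- (exact: both return the first matching position or None). On empty rest the Python loop exits
-- with kept unchanged; here the findIdx?-none branch returns acc ++ [] = acc, the same value.
def pvBloop (stripped : List String) (acc : List Int) (rest : List Int) : List Int :=
  match hj : rest.findIdx? (fun i => PySem.Str.startswith (PySem.List.pyGetD stripped i "") "/*") with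
  | none => acc ++ rest
  | some j =>
    match (rest.drop j).findIdx? (fun i => PySem.Str.endswith (PySem.List.pyGetD stripped i "") "*/") with
    | none => acc ++ rest.take j
    | some off => pvBloop stripped (acc ++ rest.take j) (rest.drop (j + off + 1))
termination_by rest.length
decreasing_by
  have hlt := (List.findIdx?_eq_some_iff_getElem.mp hj).1
  simp only [List.length_drop]
  omega

-- s.startswith(('//', '#', 'import', 'package')) (tuple form) is the disjunction of the four startswith tests.
def get_relevant_line_indices_alt (lines : List String) (num_label_lines : Int) (min_lines_above : Int) (min_lines_below : Int) : List Int :=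
  let stripped := lines.map PySem.Str.strip
  let candidates := ((PySem.List.enumerate stripped 0).filter
      (fun p => !(p.2 == "") &&
        !(PySem.Str.startswith p.2 "//" || PySem.Str.startswith p.2 "#" ||
          PySem.Str.startswith p.2 "import" || PySem.Str.startswith p.2 "package"))).map (fun p => p.1)
  let kept := pvBloop stripped [] candidates
  PySem.List.slice kept (some (min_lines_above + 1)) (some (-(num_label_lines + min_lines_below)))

-- ===== PRECONDITION & SPEC =====
def Spec_get_relevant_line_indices (lines : List String) (num_label_lines : Int) (min_lines_above : Int) (min_lines_below : Int) (out : List Int) : Prop := out = get_relevant_line_indices_alt lines num_label_lines min_lines_above min_lines_below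
instance (lines : List String) (num_label_lines : Int) (min_lines_above : Int) (min_lines_below : Int) (out : List Int) : Decidable (Spec_get_relevant_line_indices lines num_label_lines min_lines_above min_lines_below out) := by unfold Spec_get_relevant_line_indices; infer_instance

-- ===== CLAIM (what is proved, stated in full; the proofs are below) =====
def Claim_equal_get_relevant_line_indices : Prop := ∀ (lines : List String) (num_label_lines : Int) (min_lines_above : Int) (min_lines_below : Int), Dom_get_relevant_line_indices lines num_label_lines min_lines_above min_lines_below → Spec_get_relevant_line_indices lines num_label_lines min_lines_above min_lines_below (get_relevant_line_indices lines num_label_lines min_lines_above min_lines_below)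

-- ===== LEMMAS AND PROOFS =====

-- the combined keep-predicate and A's loop body, on an (index, line) pair
def pvKeep (p : Int × String) : Bool :=
  !(PySem.Str.strip p.2 == "" || PySem.Str.startswith (PySem.Str.strip p.2) "//" ||
    PySem.Str.startswith (PySem.Str.strip p.2) "#" ||
    PySem.Str.startswith (PySem.Str.strip p.2) "import" ||
    PySem.Str.startswith (PySem.Str.strip p.2) "package")

def pvStep (st : Bool × List Int) (p : Int × String) : Bool × List Int :=
  let f1 := if PySem.Str.startswith (PySem.Str.strip p.2) "/*" then true else st.1
  let acc := if !f1 then st.2 ++ [p.1] else st.2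
  let f2 := if PySem.Str.endswith (PySem.Str.strip p.2) "*/" then false else f1
  (f2, acc)

-- reference state machine on an index list, with abstract start/end predicates
def pvMach (S E : Int → Bool) : List Int → Bool → List Int
  | [], _ => []
  | i :: t, false => if S i then (if E i then pvMach S E t false else pvMach S E t true) else i :: pvMach S E t false
  | i :: t, true => if E i then pvMach S E t false else pvMach S E t true

def pvS (stripped : List String) (i : Int) : Bool := PySem.Str.startswith (PySem.List.pyGetD stripped i "") "/*"
def pvE (stripped : List String) (i : Int) : Bool := PySem.Str.endswith (PySem.List.pyGetD stripped i "") "*/"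

theorem pvGetD_enum {α : Type} [Inhabited α] (lines : List α) (d : α) (p : Int × α)
    (hp : p ∈ PySem.List.enumerate lines 0) : PySem.List.pyGetD lines p.1 d = p.2 := by
  rcases (PySem.List.mem_enumerate_iff _ _ _).1 hp with ⟨k, hk, rfl⟩
  simp [PySem.List.pyGetD_natCast, List.getD_eq_getElem?_getD, hk]

theorem pvA_eq (lines : List String) (n a b : Int) :
    get_relevant_line_indices lines n a b
    = PySem.List.slice (((PySem.List.enumerate lines 0).filter pvKeep).foldl pvStep
        (false, ([] : List Int))).2 (some (a + 1)) (some (-(n + b))) := by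
  simp only [get_relevant_line_indices, List.filter_map, List.filter_filter, List.foldl_map]
  rw [List.filter_congr (q := pvKeep) (fun p hp => by
    simp only [Function.comp, pvKeep, pvGetD_enum lines "" p hp, Bool.not_or]
    cases PySem.Str.strip p.2 == "" <;>
      cases PySem.Str.startswith (PySem.Str.strip p.2) "//" <;>
      cases PySem.Str.startswith (PySem.Str.strip p.2) "#" <;>
      cases PySem.Str.startswith (PySem.Str.strip p.2) "import" <;>
      cases PySem.Str.startswith (PySem.Str.strip p.2) "package" <;> rfl)]
  refine congrArg (fun t : Bool × List Int => PySem.List.slice t.2 (some (a + 1)) (some (-(n + b)))) ?_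
  refine PySem.List.foldl_congr_mem _ _ _ _ ?_
  intro st p hp
  have hmem : p ∈ PySem.List.enumerate lines 0 := List.mem_of_mem_filter hp
  simp only [pvStep, pvGetD_enum lines "" p hmem]

-- the strip of lines[i] is the stripped-table lookup, for pairs coming from enumerate(lines)
theorem pvStrip_lookup (lines : List String) (p : Int × String)
    (hp : p ∈ PySem.List.enumerate lines 0) :
    PySem.List.pyGetD (lines.map PySem.Str.strip) p.1 "" = PySem.Str.strip p.2 := by
  rcases (PySem.List.mem_enumerate_iff _ _ _).1 hp with ⟨k, hk, rfl⟩
  simp [PySem.List.pyGetD_natCast, List.getD_eq_getElem?_getD, hk]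

-- A's fold over kept (index, line) pairs is the state machine over the index list
theorem pvFoldl_mach (lines : List String) :
    ∀ (L : List (Int × String)), (∀ p ∈ L, p ∈ PySem.List.enumerate lines 0) →
    ∀ (flag : Bool) (acc : List Int),
    (L.foldl pvStep (flag, acc)).2
      = acc ++ pvMach (pvS (lines.map PySem.Str.strip)) (pvE (lines.map PySem.Str.strip))
          (L.map (fun p => p.1)) flag := by
  intro L
  induction L with
  | nil => intro _ flag acc; simp [pvMach]
  | cons p t ih =>
    intro hmem flag acc
    have hp : p ∈ PySem.List.enumerate lines 0 := hmem p (List.mem_cons_self ..)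
    have hs : pvS (lines.map PySem.Str.strip) p.1 = PySem.Str.startswith (PySem.Str.strip p.2) "/*" := by
      simp [pvS, pvStrip_lookup lines p hp]
    have he : pvE (lines.map PySem.Str.strip) p.1 = PySem.Str.endswith (PySem.Str.strip p.2) "*/" := by
      simp [pvE, pvStrip_lookup lines p hp]
    have ht : ∀ q ∈ t, q ∈ PySem.List.enumerate lines 0 := fun q hq => hmem q (List.mem_cons_of_mem _ hq)
    cases flag <;>
      rcases hS : PySem.Chars.startswith (PySem.Chars.strip p.2.toList) ['/', '*'] <;>
      rcases hE : PySem.Chars.endswith (PySem.Chars.strip p.2.toList) ['*', '/'] <;>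
      simp [pvStep, pvMach, hs, he, hS, hE, ih ht]

-- B's candidate list is the first-components of A's kept pairs
theorem pvEnumerate_map {α β : Type} (f : α → β) (l : List α) :
    ∀ s : Int, PySem.List.enumerate (l.map f) s = (PySem.List.enumerate l s).map (fun p => (p.1, f p.2)) := by
  induction l with
  | nil => intro s; simp [PySem.List.enumerate]
  | cons x t ih => intro s; simp [PySem.List.enumerate_cons, ih]

theorem pvCandidates_eq (lines : List String) :
    ((PySem.List.enumerate (lines.map PySem.Str.strip) 0).filter
      (fun p => !(p.2 == "") &&
        !(PySem.Str.startswith p.2 "//" || PySem.Str.startswith p.2 "#" ||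
          PySem.Str.startswith p.2 "import" || PySem.Str.startswith p.2 "package"))).map (fun p => p.1)
    = ((PySem.List.enumerate lines 0).filter pvKeep).map (fun p => p.1) := by
  rw [pvEnumerate_map, List.filter_map, List.map_map]
  refine congrArg _ (List.filter_congr (fun p _ => ?_))
  simp only [Function.comp, pvKeep]
  cases PySem.Str.strip p.2 == "" <;>
    cases PySem.Str.startswith (PySem.Str.strip p.2) "//" <;>
    cases PySem.Str.startswith (PySem.Str.strip p.2) "#" <;>
    cases PySem.Str.startswith (PySem.Str.strip p.2) "import" <;>
    cases PySem.Str.startswith (PySem.Str.strip p.2) "package" <;> rfl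

-- in-comment mode: skip up to and including the first closer
theorem pvMach_true (S E : Int → Bool) :
    ∀ l : List Int, pvMach S E l true
      = (match l.findIdx? E with
         | none => []
         | some k => pvMach S E (l.drop (k + 1)) false) := by
  intro l
  induction l with
  | nil => simp [pvMach]
  | cons i t ih =>
    rw [List.findIdx?_cons]
    rcases hE : E i
    · simp only [pvMach, hE, Bool.false_eq_true, if_false]
      rw [ih]
      cases ht : t.findIdx? E <;> simp
    · simp [pvMach, hE]

-- out-of-comment mode, next opener at position j: keep the prefix, skip to past the first closer from j
theorem pvMach_false_found (S E : Int → Bool) :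
    ∀ (l : List Int) (j : Nat), l.findIdx? S = some j →
    pvMach S E l false
      = l.take j ++ (match (l.drop j).findIdx? E with
                     | none => []
                     | some off => pvMach S E (l.drop (j + off + 1)) false) := by
  intro l
  induction l with
  | nil => intro j hj; simp at hj
  | cons i t ih =>
    intro j hj
    rw [List.findIdx?_cons] at hj
    rcases hS : S i
    · rw [hS] at hj
      simp only [Bool.false_eq_true, if_false, Option.map_eq_some_iff] at hj
      obtain ⟨j', ht, rfl⟩ := hj
      simp only [pvMach, hS, Bool.false_eq_true, if_false, List.take_succ_cons, List.drop_succ_cons]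
      rw [ih j' ht]
      cases (t.drop j').findIdx? E <;> simp [List.cons_append, Nat.add_right_comm]
    · rw [hS] at hj
      simp at hj
      subst hj
      simp only [pvMach, hS, List.take_zero, List.drop_zero, List.nil_append]
      rw [List.findIdx?_cons]
      rcases hE : E i
      · simp only [Bool.false_eq_true, if_false]
        rw [pvMach_true S E t]
        cases ht : t.findIdx? E <;> simp
      · simp

-- no opener at all: everything is kept
theorem pvMach_false_none (S E : Int → Bool) :
    ∀ l : List Int, l.findIdx? S = none → pvMach S E l false = l := by
  intro l
  induction l with
  | nil => intro _; simp [pvMach]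
  | cons i t ih =>
    intro h
    rw [List.findIdx?_cons] at h
    rcases hS : S i
    · rw [hS] at h
      simp only [Bool.false_eq_true, if_false, Option.map_eq_none_iff] at h
      simp [pvMach, hS, ih h]
    · rw [hS] at h; simp at h

-- the delimiter-search loop computes exactly the state machine started out of comment
theorem pvBloop_eq (stripped : List String) :
    ∀ (acc rest : List Int),
    pvBloop stripped acc rest = acc ++ pvMach (pvS stripped) (pvE stripped) rest false := by
  intro acc rest
  induction acc, rest using pvBloop.induct stripped with
  | case1 acc rest hj =>
      rw [pvBloop]
      split
      · rw [pvMach_false_none _ _ _ (by assumption)]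
      · rename_i j2 h2; rw [hj] at h2; simp at h2
  | case2 acc rest j hj he =>
      rw [pvBloop]
      split
      · rename_i h2; rw [hj] at h2; simp at h2
      · rename_i j2 h2
        rw [hj] at h2
        injection h2 with h2; subst h2
        split
        · rename_i h3
          have h3' : List.findIdx? (pvE stripped) (List.drop j rest) = none := h3
          rw [pvMach_false_found (pvS stripped) (pvE stripped) rest j hj, h3']
          simp
        · rename_i off2 h4; rw [he] at h4; simp at h4
  | case3 acc rest j hj off he ih =>
      rw [pvBloop]
      split
      · rename_i h2; rw [hj] at h2; simp at h2
      · rename_i j2 h2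
        rw [hj] at h2
        injection h2 with h2; subst h2
        split
        · rename_i h3; rw [he] at h3; simp at h3
        · rename_i off2 h4
          rw [he] at h4
          injection h4 with h4; subst h4
          have he' : List.findIdx? (pvE stripped) (List.drop j rest) = some off := he
          rw [ih, pvMach_false_found (pvS stripped) (pvE stripped) rest j hj, he']
          simp

theorem pvB_eq (lines : List String) (n a b : Int) :
    get_relevant_line_indices_alt lines n a b
    = PySem.List.slice
        (pvBloop (lines.map PySem.Str.strip) []
          (((PySem.List.enumerate lines 0).filter pvKeep).map (fun p => p.1)))
        (some (a + 1)) (some (-(n + b))) := by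
  simp only [get_relevant_line_indices_alt]
  rw [pvCandidates_eq]

-- ===== VERDICT (by name: the statement is the Claim_ definition above) =====
theorem get_relevant_line_indices_spec : Claim_equal_get_relevant_line_indices := by
  intro lines n a b _
  unfold Spec_get_relevant_line_indices
  rw [pvA_eq, pvB_eq, pvBloop_eq,
    pvFoldl_mach lines _ (fun p hp => List.mem_of_mem_filter hp) false []]
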